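-- pv_equiv track=rewrite | github.com/RadenAaKoesoemaWijaya/project-inventory-management | pages/forecast_new.py | analyze_resource_requirements
-- ===== SOURCE A (Python) =====
-- def analyze_resource_requirements(recommendations):
--     """Analyze resource requirements for implementing recommendations"""
--     total_cost = 0
--     personnel = 0
--     max_time = 0
--
--     for category, recs in recommendations.items():
--         for rec in recs:
--             # Simple estimation logic
--             if rec['priority'] == 'high':
--                 total_cost += 5000000
--                 personnel += 3
--                 max_time = max(max_time, 1)
--             elif rec['priority'] == 'medium':
--                 total_cost += 3000000
--                 personnel += 2
--                 max_time = max(max_time, 2)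
--             else:
--                 total_cost += 1000000
--                 personnel += 1
--                 max_time = max(max_time, 3)
--
--     return {
--         'estimated_cost': total_cost,
--         'personnel': personnel,
--         'implementation_time': max_time
--     }
-- ===== SOURCE B (Python) =====
-- def _triple(p):
--     """Resource triple (cost, personnel, time) for one recommendation priority."""
--     if p == 'high':
--         return (5000000, 3, 1)
--     if p == 'medium':
--         return (3000000, 2, 2)
--     return (1000000, 1, 3)
--
--
-- def _combine(ts):
--     """Divide-and-conquer reduction with the associative merge (+, +, max)."""
--     if not ts:
--         return (0, 0, 0)
--     if len(ts) == 1: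
--         return ts[0]
--     mid = len(ts) // 2
--     lc, lp, lt = _combine(ts[:mid])
--     rc, rp, rt = _combine(ts[mid:])
--     return (lc + rc, lp + rp, max(lt, rt))
--
--
-- def analyze_resource_requirements(recommendations):
--     """Analyze resource requirements for implementing recommendations"""
--     triples = [_triple(rec['priority']) for recs in recommendations.values() for rec in recs]
--     cost, personnel, time = _combine(triples)
--     return {
--         'estimated_cost': cost,
--         'personnel': personnel,
--         'implementation_time': time,
--     }
-- ===== Notes on version B (the rewrite author's own statement) =====
-- stated objective: alternative
-- what changed: Replaces A's single stateful accumulation loop by a map-reduce: each record is mapped to a (cost, personnel, time) triple and the triples are combined by a recursive divide-and-conquer tree reduction with the associative merge (sum, sum, max).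
import Mathlib
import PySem

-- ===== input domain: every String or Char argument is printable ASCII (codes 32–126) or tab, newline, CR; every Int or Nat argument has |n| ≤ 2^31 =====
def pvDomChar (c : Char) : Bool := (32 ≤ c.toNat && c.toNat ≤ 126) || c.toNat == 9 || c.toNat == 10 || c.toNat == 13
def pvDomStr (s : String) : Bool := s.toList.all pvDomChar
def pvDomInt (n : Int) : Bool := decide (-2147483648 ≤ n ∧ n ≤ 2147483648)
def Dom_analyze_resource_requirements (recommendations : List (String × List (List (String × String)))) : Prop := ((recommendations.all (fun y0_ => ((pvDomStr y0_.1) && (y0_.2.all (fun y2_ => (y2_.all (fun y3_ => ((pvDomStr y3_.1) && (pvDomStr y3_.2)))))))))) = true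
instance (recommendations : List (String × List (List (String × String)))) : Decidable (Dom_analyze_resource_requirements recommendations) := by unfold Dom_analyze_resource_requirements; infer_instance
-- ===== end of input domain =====

-- B replaces A's stateful accumulation loop by a map-reduce: each record becomes a
-- (cost, personnel, time) triple and the triples are combined by divide-and-conquer
-- tree reduction with the associative merge (sum, sum, max) (objective: alternative).

-- ===== PORT A =====
-- rec['priority'] on the dict built from the pair list (duplicate keys: last value wins);
-- total form with default "", exact under Pre_ (which guarantees the key is present).
def pvGetPriority (rec : List (String × String)) : String :=
  (PySem.Dict.ofList rec).getD "priority" ""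

-- one iteration of A's inner loop body on the state (total_cost, personnel, max_time)
def pvStepA (st : Int × Int × Int) (rec : List (String × String)) : Int × Int × Int :=
  if pvGetPriority rec = "high" then (st.1 + 5000000, (st.2.1 + 3, max st.2.2 1))
  else if pvGetPriority rec = "medium" then (st.1 + 3000000, (st.2.1 + 2, max st.2.2 2))
  else (st.1 + 1000000, (st.2.1 + 1, max st.2.2 3))

def analyze_resource_requirements (recommendations : List (String × List (List (String × String)))) : List (String × Int) :=
  -- recommendations.items(): the dict built from the pair list (duplicate categories collapse)
  let st := (PySem.Dict.ofList recommendations).items.foldl (fun st pair => pair.2.foldl pvStepA st) (0, (0, 0))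
  [("estimated_cost", st.1), ("personnel", st.2.1), ("implementation_time", st.2.2)]

-- ===== PORT B =====
-- Source B's _triple: resource triple (cost, personnel, time) for one priority string
def pvTriple (p : String) : Int × Int × Int :=
  if p = "high" then (5000000, 3, 1)
  else if p = "medium" then (3000000, 2, 2)
  else (1000000, 1, 3)

-- Source B's _combine: divide-and-conquer reduction with the merge (+, +, max)
def pvCombine : List (Int × Int × Int) → Int × Int × Int
  | [] => (0, 0, 0)
  | [t] => t
  | a :: b :: rest =>
      let mid := (a :: b :: rest).length / 2
      let l := pvCombine ((a :: b :: rest).take mid)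
      let r := pvCombine ((a :: b :: rest).drop mid)
      (l.1 + r.1, (l.2.1 + r.2.1, max l.2.2 r.2.2))
termination_by L => L.length
decreasing_by
  · simp [List.length_take]; omega
  · simp; omega

def analyze_resource_requirements_alt (recommendations : List (String × List (List (String × String)))) : List (String × Int) :=
  let triples := ((PySem.Dict.ofList recommendations).items.map (·.2)).flatMap
    (fun recs => recs.map (fun rec => pvTriple (pvGetPriority rec)))
  let st := pvCombine triples
  [("estimated_cost", st.1), ("personnel", st.2.1), ("implementation_time", st.2.2)]

-- ===== PRECONDITION & SPEC =====
-- Pre_ excludes exactly the inputs where some rec lacks the key 'priority', on which Python A raises KeyError.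
def Pre_analyze_resource_requirements (recommendations : List (String × List (List (String × String)))) : Prop :=
  ((PySem.Dict.ofList recommendations).items.all (fun pair => pair.2.all (fun rec => (PySem.Dict.ofList rec).contains "priority"))) = true
instance (recommendations : List (String × List (List (String × String)))) : Decidable (Pre_analyze_resource_requirements recommendations) := by unfold Pre_analyze_resource_requirements; infer_instance

def pvWitness_analyze_resource_requirements : (List (String × List (List (String × String)))) :=
  [("a", [[("priority", "high")]])]

def Spec_analyze_resource_requirements (recommendations : List (String × List (List (String × String)))) (out : List (String × Int)) : Prop := out = analyze_resource_requirements_alt recommendations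
instance (recommendations : List (String × List (List (String × String)))) (out : List (String × Int)) : Decidable (Spec_analyze_resource_requirements recommendations out) := by unfold Spec_analyze_resource_requirements; infer_instance

-- ===== CLAIM (what is proved, stated in full; the proofs are below) =====
def Claim_equal_analyze_resource_requirements : Prop := ∀ (recommendations : List (String × List (List (String × String)))), Dom_analyze_resource_requirements recommendations → Pre_analyze_resource_requirements recommendations → Spec_analyze_resource_requirements recommendations (analyze_resource_requirements recommendations)

-- ===== LEMMAS AND PROOFS =====

-- B's merge as a binary operation
def pvMerge (x y : Int × Int × Int) : Int × Int × Int :=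
  (x.1 + y.1, (x.2.1 + y.2.1, max x.2.2 y.2.2))

lemma pvMerge_assoc (x y z : Int × Int × Int) :
    pvMerge (pvMerge x y) z = pvMerge x (pvMerge y z) := by
  simp [pvMerge, max_assoc, add_assoc]

lemma pvFoldl_merge_assoc (L : List (Int × Int × Int)) (s t : Int × Int × Int) :
    L.foldl pvMerge (pvMerge s t) = pvMerge s (L.foldl pvMerge t) := by
  induction L generalizing t with
  | nil => rfl
  | cons a L ih => simp only [List.foldl_cons, pvMerge_assoc, ih]

lemma pvMerge_zero (s : Int × Int × Int) (hs : 0 ≤ s.2.2) :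
    pvMerge s (0, 0, 0) = s := by
  simp [pvMerge, max_eq_left hs]

lemma pvFoldl_merge_nonneg (L : List (Int × Int × Int)) (s : Int × Int × Int)
    (hs : 0 ≤ s.2.2) (hL : ∀ x ∈ L, 0 ≤ x.2.2) :
    0 ≤ (L.foldl pvMerge s).2.2 := by
  induction L generalizing s with
  | nil => exact hs
  | cons a L ih =>
      exact ih _ (le_trans hs (by simp [pvMerge]))
        (fun x hx => hL x (List.mem_cons_of_mem _ hx))

-- tree reduction = left fold, for lists of triples with nonnegative time components
lemma pvCombine_eq_foldl_aux (n : ℕ) : ∀ (L : List (Int × Int × Int)), L.length ≤ n →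
    (∀ x ∈ L, 0 ≤ x.2.2) → pvCombine L = L.foldl pvMerge (0, 0, 0) := by
  induction n with
  | zero =>
      intro L hlen _
      match L with
      | [] => simp [pvCombine]
      | _ :: _ => simp at hlen
  | succ n ih =>
      intro L hlen hL
      match L with
      | [] => simp [pvCombine]
      | [t] =>
          have ht : 0 ≤ t.2.2 := hL t (by simp)
          simp only [pvCombine, List.foldl_cons, List.foldl_nil]
          simp [pvMerge, Prod.ext_iff]; omega
      | a :: b :: rest =>
          simp only [pvCombine]
          have hlen' : (a :: b :: rest).length = rest.length + 2 := by simp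
          have h1 : ∀ x ∈ (a :: b :: rest).take ((a :: b :: rest).length / 2), 0 ≤ x.2.2 :=
            fun x hx => hL x (List.mem_of_mem_take hx)
          have h2 : ∀ x ∈ (a :: b :: rest).drop ((a :: b :: rest).length / 2), 0 ≤ x.2.2 :=
            fun x hx => hL x (List.mem_of_mem_drop hx)
          have l1 : ((a :: b :: rest).take ((a :: b :: rest).length / 2)).length ≤ n := by
            simp only [List.length_take, hlen'] at *
            omega
          have l2 : ((a :: b :: rest).drop ((a :: b :: rest).length / 2)).length ≤ n := by
            simp only [List.length_drop, hlen'] at *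
            omega
          rw [ih _ l1 h1, ih _ l2 h2]
          have hnn : 0 ≤ (((a :: b :: rest).take ((a :: b :: rest).length / 2)).foldl pvMerge (0, 0, 0)).2.2 :=
            pvFoldl_merge_nonneg _ _ (by norm_num) h1
          have := pvFoldl_merge_assoc ((a :: b :: rest).drop ((a :: b :: rest).length / 2))
            (((a :: b :: rest).take ((a :: b :: rest).length / 2)).foldl pvMerge (0, 0, 0)) (0, 0, 0)
          rw [pvMerge_zero _ hnn] at this
          have h3 : List.foldl pvMerge (0, 0, 0) (a :: b :: rest)
              = pvMerge (((a :: b :: rest).take ((a :: b :: rest).length / 2)).foldl pvMerge (0, 0, 0))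
                  (((a :: b :: rest).drop ((a :: b :: rest).length / 2)).foldl pvMerge (0, 0, 0)) := by
            conv_lhs => rw [← List.take_append_drop ((a :: b :: rest).length / 2) (a :: b :: rest)]
            rw [List.foldl_append, this]
          rw [h3]
          rfl

lemma pvCombine_eq_foldl (L : List (Int × Int × Int)) (hL : ∀ x ∈ L, 0 ≤ x.2.2) :
    pvCombine L = L.foldl pvMerge (0, 0, 0) :=
  pvCombine_eq_foldl_aux L.length L le_rfl hL

lemma pvTriple_time_nonneg (p : String) : 0 ≤ (pvTriple p).2.2 := by
  unfold pvTriple; split_ifs <;> norm_num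

-- A's loop body equals merging with the record's resource triple
lemma pvStepA_eq_merge (st : Int × Int × Int) (rec : List (String × String)) :
    pvStepA st rec = pvMerge st (pvTriple (pvGetPriority rec)) := by
  unfold pvStepA pvTriple pvMerge; split_ifs <;> rfl

-- A's nested loop equals a single fold of pvMerge over the flattened triple list
lemma pv_nested_eq_flat (recs : List (String × List (List (String × String)))) (st : Int × Int × Int) :
    recs.foldl (fun st pair => pair.2.foldl pvStepA st) st
      = ((recs.map (·.2)).flatMap (fun l => l.map (fun rec => pvTriple (pvGetPriority rec)))).foldl pvMerge st := by
  induction recs generalizing st with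
  | nil => rfl
  | cons hd tl ih =>
      simp only [List.foldl_cons, List.map_cons, List.flatMap_cons, List.foldl_append, ih,
        List.foldl_map]
      congr 1
      apply List.foldl_ext
      intro a b _
      exact pvStepA_eq_merge a b

-- ===== VERDICT (by name: the statement is the Claim_ definition above) =====
theorem analyze_resource_requirements_spec : Claim_equal_analyze_resource_requirements := by
  intro recs _ _
  have h : ∀ x ∈ (((PySem.Dict.ofList recs).items.map (·.2)).flatMap
      (fun l => l.map (fun rec => pvTriple (pvGetPriority rec)))), 0 ≤ x.2.2 := by
    intro x hx
    simp only [List.mem_flatMap, List.mem_map] at hx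
    obtain ⟨l, -, r, -, rfl⟩ := hx
    exact pvTriple_time_nonneg _
  unfold Spec_analyze_resource_requirements analyze_resource_requirements analyze_resource_requirements_alt
  simp only [pv_nested_eq_flat, pvCombine_eq_foldl _ h]
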